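-- pv_equiv track=rewrite | github.com/cowboysmall-comp/hackerrank | src/algorithms/dynamic_programming/grid_walking.py | combs
-- ===== SOURCE A (Python) =====
-- def combs(M):
--     C = [[0 for _ in range(M + 1)] for _ in range(M + 1)]
--
--     for i in range(M + 1):
--         C[i][0] = 1
--         C[i][i] = 1
--
--     for i in range(1, M + 1):
--         for j in range(1, i):
--             C[i][j]  = C[i - 1][j - 1] + C[i - 1][j]
--             C[i][j] %= 1000000007
--
--     return C
-- ===== SOURCE B (Python) =====
-- def combs(M):
--     p = 1000000007
--     cols = [[1] * (M + 1)]            # column 0: C(i,0) = 1 for every i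
--     col = cols[0]
--     for j in range(1, M + 1):
--         prev = col
--         col = [0] * j                 # C(i,j) = 0 for i < j
--         s = 0
--         for i in range(j, M + 1):     # hockey stick: C(i,j) = sum_{k<i} C(k,j-1)
--             s = (s + prev[i - 1]) % p
--             col.append(s)
--         cols.append(col)
--     return [[c[i] for c in cols] for i in range(M + 1)]
-- ===== Notes on version B (the rewrite author's own statement) =====
-- stated objective: alternative
-- what changed: Replaces A's row-major Pascal DP (each row from the previous row via C[i][j]=C[i-1][j-1]+C[i-1][j] in a preallocated square table) with a column-major construction based on the hockey-stick identity: each column is the running prefix sum, modulo the same prime modulus, of the previous column; columns are appended as built and the column list is transposed at the end.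
import Mathlib
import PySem

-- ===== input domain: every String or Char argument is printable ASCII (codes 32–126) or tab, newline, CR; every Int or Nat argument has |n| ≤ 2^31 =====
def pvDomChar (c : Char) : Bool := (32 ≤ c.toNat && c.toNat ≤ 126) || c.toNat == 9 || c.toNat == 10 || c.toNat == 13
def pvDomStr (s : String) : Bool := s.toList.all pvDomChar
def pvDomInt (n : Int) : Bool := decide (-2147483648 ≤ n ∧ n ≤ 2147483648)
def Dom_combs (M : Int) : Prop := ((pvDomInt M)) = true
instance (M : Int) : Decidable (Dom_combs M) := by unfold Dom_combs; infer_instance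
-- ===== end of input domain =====

-- B replaces A's row-major Pascal DP with a column-major construction: by the hockey-stick
-- identity each column is the running prefix sum, modulo the same prime, of the previous
-- column; the column list is transposed at the end (objective: alternative algorithm).

-- ===== PORT A =====
-- C[i][j] read/write with Python Int indices (all indices A uses are nonnegative and in range)
def pvGet2 (C : List (List Int)) (i j : Int) : Int :=
  PySem.List.pyGetD (PySem.List.pyGetD C i []) j 0

def pvSet2 (C : List (List Int)) (i j : Int) (v : Int) : List (List Int) :=
  PySem.List.pySetD C i (PySem.List.pySetD (PySem.List.pyGetD C i []) j v)

def combs (M : Int) : List (List Int) :=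
  let C0 : List (List Int) :=
    (PySem.List.pyRange 0 (M+1) 1).map (fun _ => (PySem.List.pyRange 0 (M+1) 1).map (fun _ => (0:Int)))
  let C1 := (PySem.List.pyRange 0 (M+1) 1).foldl (fun C i => pvSet2 (pvSet2 C i 0 1) i i 1) C0
  (PySem.List.pyRange 1 (M+1) 1).foldl (fun C i =>
    (PySem.List.pyRange 1 i 1).foldl (fun C j =>
      pvSet2 C i j (PySem.Int.mod (pvGet2 C (i-1) (j-1) + pvGet2 C (i-1) j) 1000000007)) C) C1

-- ===== PORT B =====
-- inner loop of Source B: col=[0]*j; s=0; for i in range(j, M+1): s=(s+prev[i-1])%p; col.append(s)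
def pvColLoop (M : Int) (j : Int) (prev : List Int) : List Int :=
  ((PySem.List.pyRange j (M+1) 1).foldl
    (fun (cs : List Int × Int) i =>
      let s := PySem.Int.mod (cs.2 + PySem.List.pyGetD prev (i-1) 0) 1000000007
      (cs.1 ++ [s], s))
    (List.replicate j.toNat 0, 0)).1

def combs_alt (M : Int) : List (List Int) :=
  let col0 : List Int := List.replicate (M+1).toNat 1
  let st := (PySem.List.pyRange 1 (M+1) 1).foldl
    (fun (st : List (List Int) × List Int) j =>
      let c := pvColLoop M j st.2
      (st.1 ++ [c], c))
    ([col0], col0)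
  (PySem.List.pyRange 0 (M+1) 1).map (fun i => st.1.map (fun c => PySem.List.pyGetD c i 0))

-- ===== PRECONDITION & SPEC =====
def Spec_combs (M : Int) (out : List (List Int)) : Prop := out = combs_alt M
instance (M : Int) (out : List (List Int)) : Decidable (Spec_combs M out) := by unfold Spec_combs; infer_instance

-- ===== CLAIM (what is proved, stated in full; the proofs are below) =====
def Claim_equal_combs : Prop := ∀ (M : Int), Dom_combs M → Spec_combs M (combs M)

-- ===== LEMMAS AND PROOFS =====

-- the common normal form: entry (i,j) of both tables is C(i,j) mod 1000000007
def pvEntry (i j : Nat) : Int := ((Nat.choose i j % 1000000007 : Nat) : Int)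

lemma pvmod_natlit (n : Nat) :
    PySem.Int.mod (n : Int) 1000000007 = ((n % 1000000007 : Nat) : Int) := by
  have h := PySem.Int.mod_natCast n 1000000007
  simpa using h

-- ---- A side: combs M in normal form (via the intermediate row family pvRowB) ----

def pvStepRow (M : Int) (row : List Int) : List Int :=
  1 :: (PySem.List.pyRange 1 (M+1) 1).map (fun j =>
    PySem.Int.mod (PySem.List.pyGetD row (j-1) 0 + PySem.List.pyGetD row j 0) 1000000007)

lemma len_stepRow (N : Nat) (r : List Int) : (pvStepRow (N:Int) r).length = N+1 := by
  simp [pvStepRow, PySem.List.length_pyRange_one]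

lemma stepRow_getD (N : Nat) (r : List Int) (t : Nat) (h1 : 1 ≤ t) (h2 : t ≤ N) :
    (pvStepRow (N:Int) r).getD t 0
      = PySem.Int.mod (r.getD (t-1) 0 + r.getD t 0) 1000000007 := by
  cases t with
  | zero => omega
  | succ s =>
    simp only [pvStepRow, List.getD_cons_succ]
    rw [← PySem.List.pyGetD_natCast]
    rw [PySem.List.pyGetD_map_pyRange_one _ 1 ((N:Int)+1) s 0 (by omega)]
    have e1 : (1:Int) + (s:Int) - 1 = ((s:Nat):Int) := by push_cast; ring
    have e2 : (1:Int) + (s:Int) = ((s+1:Nat):Int) := by push_cast; ring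
    rw [e1, e2, PySem.List.pyGetD_natCast, PySem.List.pyGetD_natCast]
    simp

lemma stepRow_getD_hi (N : Nat) (r : List Int) (t : Nat) (ht : N < t) :
    (pvStepRow (N:Int) r).getD t 0 = 0 := by
  apply List.getD_eq_default
  rw [len_stepRow]; omega

lemma getD_map_range' {α : Type} (f : Nat → α) (n k : Nat) (d : α) :
    ((List.range n).map f).getD k d = if k < n then f k else d := by
  by_cases h : k < n
  · rw [PySem.List.getD_map_range f n k d h, if_pos h]
  · rw [if_neg h]
    apply List.getD_eq_default
    simp; omega

lemma set_map_range {α : Type} (f : Nat → α) (n m : Nat) (v : α) (hm : m < n) :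
    ((List.range n).map f).set m v
      = (List.range n).map (fun k => if k = m then v else f k) := by
  apply List.ext_getElem (by simp)
  intro t h1 h2
  simp only [List.getElem_set, List.getElem_map, List.getElem_range]
  rcases eq_or_ne t m with rfl | hne
  · simp
  · simp [hne, Ne.symm hne]

def pvRowB (N : Nat) : Nat → List Int
  | 0 => 1 :: List.replicate N 0
  | k+1 => pvStepRow (N:Int) (pvRowB N k)

def pvInit (N k : Nat) : List Int := ((List.replicate (N+1) (0:Int)).set 0 1).set k 1

def pvPartial (N i : Nat) : Nat → List Int
  | 0 => pvInit N (i+1)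
  | m+1 => (pvPartial N i m).set (m+1)
      (PySem.Int.mod ((pvRowB N i).getD m 0 + (pvRowB N i).getD (m+1) 0) 1000000007)

lemma pvmod_zero : PySem.Int.mod 0 1000000007 = 0 := by decide
lemma pvmod_one : PySem.Int.mod 1 1000000007 = 1 := by decide

lemma len_pvRowB (N k : Nat) : (pvRowB N k).length = N+1 := by
  cases k with
  | zero => simp [pvRowB]
  | succ s => rw [pvRowB, len_stepRow]

lemma pvRowB_hi (N k : Nat) (hk : k ≤ N) : ∀ t, k < t → (pvRowB N k).getD t 0 = 0 := by
  induction k with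
  | zero =>
    intro t ht
    cases t with
    | zero => omega
    | succ s => simp [pvRowB, List.getD_cons_succ]
  | succ s ih =>
    intro t ht
    by_cases h : t ≤ N
    · rw [pvRowB, stepRow_getD N _ t (by omega) h,
        ih (by omega) (t-1) (by omega), ih (by omega) t (by omega)]
      simpa using pvmod_zero
    · rw [pvRowB, stepRow_getD_hi N _ t (by omega)]

lemma pvRowB_diag (N k : Nat) (hk : k ≤ N) : (pvRowB N k).getD k 0 = 1 := by
  induction k with
  | zero => simp [pvRowB]
  | succ s ih =>
    rw [pvRowB, stepRow_getD N _ (s+1) (by omega) hk]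
    simp only [Nat.add_sub_cancel]
    rw [ih (by omega), pvRowB_hi N s (by omega) (s+1) (by omega)]
    simpa using pvmod_one

lemma pvInit_getD (N k t : Nat) (hk : k ≤ N) :
    (pvInit N k).getD t 0 = if t = k ∨ t = 0 then 1 else 0 := by
  simp only [pvInit, List.getD_eq_getElem?_getD, List.getElem?_set, List.getElem?_replicate]
  split_ifs <;> simp_all <;> omega

lemma pvPartial_len (N i m : Nat) : (pvPartial N i m).length = N+1 := by
  induction m with
  | zero => simp [pvPartial, pvInit]
  | succ s ih => simpa [pvPartial]

lemma pvPartial_getD (N i m t : Nat) (hi : i + 1 ≤ N) (hm : m ≤ i) :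
    (pvPartial N i m).getD t 0
      = if 1 ≤ t ∧ t ≤ m
        then PySem.Int.mod ((pvRowB N i).getD (t-1) 0 + (pvRowB N i).getD t 0) 1000000007
        else (pvInit N (i+1)).getD t 0 := by
  induction m with
  | zero => rw [show pvPartial N i 0 = pvInit N (i+1) from rfl, if_neg (by omega)]
  | succ s ih =>
    have hlen : s + 1 < (pvPartial N i s).length := by rw [pvPartial_len]; omega
    rw [pvPartial]
    rcases eq_or_ne t (s+1) with rfl | hne
    · rw [List.getD_eq_getElem?_getD, List.getElem?_set_self hlen]
      simp
    · rw [List.getD_eq_getElem?_getD, List.getElem?_set_ne (Ne.symm hne),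
        ← List.getD_eq_getElem?_getD, ih (by omega)]
      split_ifs with a b b <;> try rfl
      · omega
      · omega

lemma pvPartial_eq_row (N i : Nat) (hi : i + 1 ≤ N) :
    pvPartial N i i = pvRowB N (i+1) := by
  apply List.ext_getElem (by rw [pvPartial_len, len_pvRowB])
  intro t h1 h2
  rw [pvPartial_len] at h1
  rw [← List.getD_eq_getElem _ 0, ← List.getD_eq_getElem _ 0]
  rw [pvPartial_getD N i i t hi le_rfl, pvInit_getD N (i+1) t hi, pvRowB]
  rcases Nat.eq_zero_or_pos t with rfl | htpos
  · simp [pvStepRow]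
  · rw [stepRow_getD N _ t htpos (by omega)]
    rcases Nat.lt_trichotomy t (i+1) with hlt | rfl | hgt
    · rw [if_pos ⟨htpos, by omega⟩]
    · rw [if_neg (by omega), if_pos (Or.inl rfl),
        Nat.add_sub_cancel, pvRowB_diag N i (by omega),
        pvRowB_hi N i (by omega) (i+1) (by omega)]
      simpa using pvmod_one
    · rw [if_neg (by omega), if_neg (by omega),
        pvRowB_hi N i (by omega) (t-1) (by omega),
        pvRowB_hi N i (by omega) t (by omega)]
      simpa using pvmod_zero

lemma map_const_replicate {α : Type} (n : Nat) (x : α) :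
    (List.range n).map (fun _ => x) = List.replicate n x := by
  simp [List.map_const']

lemma C1_fold (N m : Nat) (hm : m ≤ N+1) :
    ((PySem.List.pyRange 0 (m:Int) 1).foldl
      (fun C i => pvSet2 (pvSet2 C i 0 1) i i 1)
      (List.replicate (N+1) (List.replicate (N+1) (0:Int))))
    = (List.range (N+1)).map (fun k => if k < m then pvInit N k else List.replicate (N+1) 0) := by
  induction m with
  | zero =>
    rw [show ((0:Nat):Int) = 0 from rfl, PySem.List.pyRange_one_eq_nil le_rfl]
    simp only [List.foldl_nil]
    rw [show (fun (k:Nat) => if k < 0 then pvInit N k else List.replicate (N+1) (0:Int))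
        = (fun (_:Nat) => List.replicate (N+1) (0:Int)) from by funext k; simp]
    rw [map_const_replicate]
  | succ s ih =>
    have e : ((s+1:Nat):Int) = (s:Int) + 1 := by push_cast; ring
    rw [e, PySem.List.pyRange_one_succ_right (Int.natCast_nonneg s), List.foldl_append,
      ih (by omega)]
    simp only [List.foldl_cons, List.foldl_nil]
    have hs : s < N + 1 := by omega
    rw [pvSet2, pvSet2]
    simp only [PySem.List.pyGetD_natCast, PySem.List.pySetD_natCast]
    rw [getD_map_range' _ (N+1) s [], if_pos hs, if_neg (lt_irrefl s)]
    have hlen : s < ((List.range (N+1)).map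
        (fun k => if k < s then pvInit N k else List.replicate (N+1) (0:Int))).length := by
      simpa using hs
    have h0 : ∀ (xs : List Int) (v : Int), PySem.List.pySetD xs (0:Int) v = xs.set 0 v := by
      intro xs v; simp [PySem.List.pySetD_of_nonneg]
    rw [h0]
    rw [List.getD_eq_getElem?_getD, List.getElem?_set_self hlen]
    simp only [Option.getD_some, List.set_set]
    rw [set_map_range _ (N+1) s _ hs]
    congr 1
    funext k
    rcases eq_or_ne k s with rfl | hne
    · simp [pvInit]
    · by_cases hk : k < s <;> simp [hne, hk] <;> omega

lemma inner_fold (N i m : Nat) (hi : i + 1 ≤ N) (hm : m ≤ i)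
    (G : Nat → List Int) (hGi : G i = pvRowB N i) (hG : G (i+1) = pvInit N (i+1)) :
    ((PySem.List.pyRange 1 ((m:Int)+1) 1).foldl
      (fun C j =>
        pvSet2 C ((i:Int)+1) j
          (PySem.Int.mod (pvGet2 C (((i:Int)+1)-1) (j-1) + pvGet2 C (((i:Int)+1)-1) j) 1000000007))
      ((List.range (N+1)).map G))
    = (List.range (N+1)).map (fun k => if k = i+1 then pvPartial N i m else G k) := by
  induction m with
  | zero =>
    rw [show ((0:Nat):Int)+1 = 1 from by norm_num, PySem.List.pyRange_one_eq_nil le_rfl]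
    simp only [List.foldl_nil]
    congr 1
    funext k
    rcases eq_or_ne k (i+1) with rfl | hne
    · simp [pvPartial, hG]
    · simp [hne]
  | succ s ih =>
    have e : ((s+1:Nat):Int)+1 = ((s:Int)+1) + 1 := by push_cast; ring
    rw [e, PySem.List.pyRange_one_succ_right (by omega), List.foldl_append, ih (by omega)]
    simp only [List.foldl_cons, List.foldl_nil]
    have hi1 : i + 1 < N + 1 := by omega
    have hii : i < N + 1 := by omega
    have ei : ((i:Int)+1) = (((i+1:Nat)):Int) := by push_cast; ring
    have ej : ((s:Int)+1) = (((s+1:Nat)):Int) := by push_cast; ring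
    have ei' : ((i:Int)+1)-1 = ((i:Nat):Int) := by push_cast; ring
    have ej' : ((s:Int)+1)-1 = ((s:Nat):Int) := by push_cast; ring
    rw [pvSet2, pvGet2, pvGet2, ei', ej']
    rw [ei, ej]
    simp only [PySem.List.pyGetD_natCast, PySem.List.pySetD_natCast]
    rw [getD_map_range' _ (N+1) i [], if_pos hii, if_neg (by omega : ¬ i = i+1), hGi]
    rw [getD_map_range' _ (N+1) (i+1) [], if_pos hi1, if_pos rfl]
    rw [set_map_range _ (N+1) (i+1) _ hi1]
    congr 1
    funext k
    rcases eq_or_ne k (i+1) with rfl | hne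
    · simp [pvPartial]
    · simp [hne]

lemma pvInit_zero (N : Nat) : pvInit N 0 = pvRowB N 0 := by
  simp [pvInit, pvRowB, List.replicate_succ]

lemma outer_fold (N i : Nat) (hi : i ≤ N) :
    ((PySem.List.pyRange 1 ((i:Int)+1) 1).foldl
      (fun C i =>
        (PySem.List.pyRange 1 i 1).foldl (fun C j =>
          pvSet2 C i j (PySem.Int.mod (pvGet2 C (i-1) (j-1) + pvGet2 C (i-1) j) 1000000007)) C)
      ((List.range (N+1)).map (pvInit N)))
    = (List.range (N+1)).map (fun k => if k ≤ i then pvRowB N k else pvInit N k) := by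
  induction i with
  | zero =>
    rw [show ((0:Nat):Int)+1 = 1 from by norm_num, PySem.List.pyRange_one_eq_nil le_rfl]
    simp only [List.foldl_nil]
    congr 1
    funext k
    rcases eq_or_ne k 0 with rfl | hne
    · simp [pvInit_zero]
    · simp [hne, Nat.pos_of_ne_zero hne]
  | succ s ih =>
    have e : ((s+1:Nat):Int)+1 = ((s:Int)+1) + 1 := by push_cast; ring
    rw [e, PySem.List.pyRange_one_succ_right (by omega), List.foldl_append, ih (by omega)]
    simp only [List.foldl_cons, List.foldl_nil]
    have := inner_fold N s s (by omega) le_rfl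
      (fun k => if k ≤ s then pvRowB N k else pvInit N k)
      (by simp) (by simp)
    rw [this]
    congr 1
    funext k
    rcases eq_or_ne k (s+1) with rfl | hne
    · rw [pvPartial_eq_row N s (by omega)]
      simp
    · by_cases hk : k ≤ s <;> simp [hne, hk] <;> omega

lemma combs_eq (M : Int) (h : 0 ≤ M) :
    combs M = (List.range (M.toNat+1)).map (pvRowB M.toNat) := by
  have hM : M = (M.toNat : Int) := (Int.toNat_of_nonneg h).symm
  set N := M.toNat with hN
  rw [combs]
  conv_lhs => rw [hM]
  have elen : (((N:Int)+1) - 0).toNat = N + 1 := by omega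
  have eC0 : ((PySem.List.pyRange 0 ((N:Int)+1) 1).map
      (fun _ => (PySem.List.pyRange 0 ((N:Int)+1) 1).map (fun _ => (0:Int))))
      = List.replicate (N+1) (List.replicate (N+1) (0:Int)) := by
    simp [List.map_const', elen]
  rw [eC0]
  have e1 : ((N:Int)+1) = (((N+1:Nat)):Int) := by push_cast; ring
  rw [e1, C1_fold N (N+1) le_rfl]
  have eInit : (List.range (N+1)).map (fun k => if k < N+1 then pvInit N k else List.replicate (N+1) 0)
      = (List.range (N+1)).map (pvInit N) := by
    apply List.map_congr_left
    intro k hk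
    rw [List.mem_range] at hk
    simp [hk]
  rw [eInit, ← e1]
  rw [show ((N+1:Nat):Int) = (N:Int)+1 from by push_cast; ring] at *
  rw [outer_fold N N le_rfl]
  apply List.map_congr_left
  intro k hk
  rw [List.mem_range] at hk
  simp [Nat.lt_succ_iff.mp hk]

-- ---- A's rows are binomials mod p ----

lemma pvEntry_of_lt (i t : Nat) (h : i < t) : pvEntry i t = 0 := by
  simp [pvEntry, Nat.choose_eq_zero_of_lt h]

lemma pvmod_entry_add (i s : Nat) :
    PySem.Int.mod (pvEntry i s + pvEntry i (s+1)) 1000000007 = pvEntry (i+1) (s+1) := by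
  unfold pvEntry
  rw [show ((Nat.choose i s % 1000000007 : Nat) : Int) + ((Nat.choose i (s+1) % 1000000007 : Nat) : Int)
      = (((Nat.choose i s % 1000000007 + Nat.choose i (s+1) % 1000000007 : Nat)) : Int) from by push_cast; ring]
  rw [pvmod_natlit]
  congr 1
  rw [← Nat.add_mod, Nat.choose_succ_succ]

lemma pvRowB_entry (N : Nat) : ∀ i, i ≤ N → ∀ t, t ≤ N → (pvRowB N i).getD t 0 = pvEntry i t := by
  intro i
  induction i with
  | zero =>
    intro _ t ht
    cases t with
    | zero => simp [pvRowB, pvEntry]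
    | succ s =>
      rw [pvEntry_of_lt 0 (s+1) (by omega)]
      simp [pvRowB, List.getD_cons_succ]
  | succ s ih =>
    intro hi t ht
    cases t with
    | zero => simp [pvRowB, pvStepRow, pvEntry]
    | succ u =>
      rw [pvRowB, stepRow_getD N _ (u+1) (by omega) ht]
      simp only [Nat.add_sub_cancel]
      rw [ih (by omega) u (by omega), ih (by omega) (u+1) ht]
      exact pvmod_entry_add s u

lemma pvRowB_eq_map (N i : Nat) (hi : i ≤ N) :
    pvRowB N i = (List.range (N+1)).map (pvEntry i) := by
  apply List.ext_getElem (by rw [len_pvRowB]; simp)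
  intro t h1 h2
  rw [len_pvRowB] at h1
  rw [← List.getD_eq_getElem _ 0, ← List.getD_eq_getElem _ 0,
    getD_map_range' _ (N+1) t 0, if_pos h1, pvRowB_entry N i hi t (by omega)]

lemma combs_norm (M : Int) (h : 0 ≤ M) :
    combs M = (List.range (M.toNat+1)).map (fun i => (List.range (M.toNat+1)).map (pvEntry i)) := by
  rw [combs_eq M h]
  apply List.map_congr_left
  intro i hi
  rw [List.mem_range] at hi
  exact pvRowB_eq_map M.toNat i (by omega)

-- ---- B side: columns are prefix sums of the previous column (hockey stick) ----

def pvColB (N j : Nat) : List Int := (List.range (N+1)).map (fun i => pvEntry i j)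

lemma col0_eq (N : Nat) : List.replicate (N+1) (1:Int) = pvColB N 0 := by
  rw [pvColB, show (fun i => pvEntry i 0) = (fun (_ : Nat) => (1:Int)) from by
    funext i; simp [pvEntry], map_const_replicate]

lemma pvmod_entry_add' (a j : Nat) (hj : 1 ≤ j) :
    PySem.Int.mod (pvEntry a j + pvEntry a (j-1)) 1000000007 = pvEntry (a+1) j := by
  rw [Int.add_comm]
  have h := pvmod_entry_add a (j-1)
  rw [show j - 1 + 1 = j from by omega] at h
  exact h

lemma innerFold (N j : Nat) (hj : 1 ≤ j) : ∀ m, j + m ≤ N + 1 →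
    ((PySem.List.pyRange (j:Int) ((j+m:Nat):Int) 1).foldl
      (fun (cs : List Int × Int) i =>
        let s := PySem.Int.mod (cs.2 + PySem.List.pyGetD (pvColB N (j-1)) (i-1) 0) 1000000007
        (cs.1 ++ [s], s))
      (List.replicate j 0, 0))
    = (List.replicate j (0:Int) ++ (List.range m).map (fun k => pvEntry (j+k) j),
       pvEntry (j-1+m) j) := by
  intro m
  induction m with
  | zero =>
    intro _
    rw [show ((j+0:Nat):Int) = (j:Int) from by push_cast; ring,
      PySem.List.pyRange_one_eq_nil le_rfl]
    simp [pvEntry_of_lt (j-1) j (by omega)]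
  | succ m ih =>
    intro hm
    rw [show ((j+(m+1):Nat):Int) = ((j+m:Nat):Int) + 1 from by push_cast; ring,
      PySem.List.pyRange_one_succ_right (by push_cast; omega),
      List.foldl_append, ih (by omega)]
    simp only [List.foldl_cons, List.foldl_nil]
    have e1 : ((j+m:Nat):Int) - 1 = ((j+m-1:Nat):Int) := by push_cast [hj]; omega
    rw [e1, PySem.List.pyGetD_natCast, pvColB,
      getD_map_range' (fun i => pvEntry i (j-1)) (N+1) (j+m-1) 0, if_pos (by omega)]
    rw [show j - 1 + m = j + m - 1 from by omega]
    rw [pvmod_entry_add' (j+m-1) j hj]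
    rw [show j + m - 1 + 1 = j + m from by omega]
    rw [Prod.mk.injEq]
    refine ⟨?_, ?_⟩
    · rw [List.range_succ (n := m), List.map_append, List.append_assoc]
      simp
    · rw [show j - 1 + (m+1) = j + m from by omega]

lemma col_eq (N j : Nat) (hj : j ≤ N) :
    List.replicate j (0:Int) ++ (List.range (N+1-j)).map (fun k => pvEntry (j+k) j)
      = pvColB N j := by
  rw [pvColB]
  have e : N + 1 = j + (N+1-j) := by omega
  conv_rhs => rw [e, List.range_add, List.map_append, List.map_map]
  congr 1
  · rw [show ((List.range j).map (fun i => pvEntry i j))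
        = (List.range j).map (fun _ => (0:Int)) from
      List.map_congr_left (by
        intro k hk
        rw [List.mem_range] at hk
        exact pvEntry_of_lt k j hk), map_const_replicate]

lemma pvColLoop_eq (N j : Nat) (hj : 1 ≤ j) (hjN : j ≤ N) :
    pvColLoop ((N:Nat):Int) ((j:Nat):Int) (pvColB N (j-1)) = pvColB N j := by
  rw [pvColLoop]
  rw [show ((N:Nat):Int) + 1 = ((j + (N+1-j) : Nat):Int) from by push_cast; omega]
  rw [show ((j:Nat):Int).toNat = j from by omega]
  rw [innerFold N j hj (N+1-j) (by omega)]
  exact col_eq N j hjN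

lemma outerFold (N : Nat) : ∀ m, m ≤ N →
    ((PySem.List.pyRange 1 ((m+1:Nat):Int) 1).foldl
      (fun (st : List (List Int) × List Int) j =>
        let c := pvColLoop ((N:Nat):Int) j st.2
        (st.1 ++ [c], c))
      ([pvColB N 0], pvColB N 0))
    = ((List.range (m+1)).map (pvColB N), pvColB N m) := by
  intro m
  induction m with
  | zero =>
    intro _
    rw [show ((0+1:Nat):Int) = 1 from by norm_num, PySem.List.pyRange_one_eq_nil le_rfl]
    simp
  | succ m ih =>
    intro hm
    rw [show ((m+1+1:Nat):Int) = ((m+1:Nat):Int) + 1 from by push_cast; ring,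
      PySem.List.pyRange_one_succ_right (by exact_mod_cast Nat.one_le_iff_ne_zero.mpr (by omega)),
      List.foldl_append, ih (by omega)]
    simp only [List.foldl_cons, List.foldl_nil]
    have h := pvColLoop_eq N (m+1) (by omega) hm
    rw [show (m+1) - 1 = m from by omega] at h
    rw [h, Prod.mk.injEq]
    refine ⟨?_, rfl⟩
    rw [List.range_succ (n := m+1), List.map_append]
    simp

lemma combs_alt_norm (M : Int) (h : 0 ≤ M) :
    combs_alt M = (List.range (M.toNat+1)).map (fun i => (List.range (M.toNat+1)).map (pvEntry i)) := by
  set N := M.toNat with hN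
  have hM : M = (N : Int) := by omega
  rw [combs_alt]
  simp only
  rw [hM]
  rw [show ((N:Int) + 1).toNat = N + 1 from by omega, col0_eq N]
  rw [show (N:Int) + 1 = ((N+1:Nat):Int) from by push_cast; ring]
  rw [outerFold N N le_rfl]
  rw [show (List.map (pvColB N) (List.range (N+1)), pvColB N N).1
      = List.map (pvColB N) (List.range (N+1)) from rfl]
  rw [PySem.List.pyRange_zero_nat, List.map_map]
  apply List.map_congr_left
  intro i hi
  rw [List.mem_range] at hi
  simp only [Function.comp_apply]
  rw [List.map_map]
  apply List.map_congr_left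
  intro j _
  simp only [Function.comp_apply]
  rw [pvColB, PySem.List.pyGetD_natCast,
    getD_map_range' (fun t => pvEntry t j) (N+1) i 0, if_pos hi]

-- ===== VERDICT (by name: the statement is the Claim_ definition above) =====
theorem combs_spec : Claim_equal_combs := by
  intro M _
  unfold Spec_combs
  by_cases h : 0 ≤ M
  · rw [combs_norm M h, combs_alt_norm M h]
  · have h1 : M + 1 ≤ 0 := by omega
    rw [combs, combs_alt]
    rw [PySem.List.pyRange_one_eq_nil h1, PySem.List.pyRange_one_eq_nil (by omega)]
    simp
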